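-- pv_equiv track=rewrite | github.com/evelandy/ecomm-1 | server/test.py | full_house
-- ===== SOURCE A (Python) =====
-- def full_house(cards):
--     card_arr = []
--     card_obj = {}
--     house = [2, 3]
--     for card in cards.split():
--         if len(card) == 3:
--             kind = card[:2]
--         else:
--             kind = card[0]
--         card_arr.append(kind)
--     for card in card_arr:
--         if card in card_obj.keys():
--             card_obj[card] += 1
--         else:
--             card_obj[card] = 1
--     for card in card_obj.values():
--         if card in house:
--             house.remove(card)
--     if len(house) == 0:
--         return True
--     else:
--         return False
-- ===== SOURCE B (Python) =====
-- def full_house(cards):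
--     kinds = [t[:2] if len(t) == 3 else t[0] for t in cards.split()]
--     have2 = have3 = False
--     while kinds:
--         k = kinds[0]
--         rest = [x for x in kinds if x != k]
--         n = len(kinds) - len(rest)
--         if n == 2:
--             have2 = True
--         if n == 3:
--             have3 = True
--         kinds = rest
--     return have2 and have3
-- ===== Notes on version B (the rewrite author's own statement) =====
-- stated objective: alternative
-- what changed: Replaces the dict of counts plus the destructive remove-from-[2,3] checklist with an elimination loop: repeatedly take the first remaining kind, drop all its occurrences by filtering, measure its multiplicity as the length difference, and set have2/have3 flags; no counting table is ever built.
import Mathlib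
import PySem

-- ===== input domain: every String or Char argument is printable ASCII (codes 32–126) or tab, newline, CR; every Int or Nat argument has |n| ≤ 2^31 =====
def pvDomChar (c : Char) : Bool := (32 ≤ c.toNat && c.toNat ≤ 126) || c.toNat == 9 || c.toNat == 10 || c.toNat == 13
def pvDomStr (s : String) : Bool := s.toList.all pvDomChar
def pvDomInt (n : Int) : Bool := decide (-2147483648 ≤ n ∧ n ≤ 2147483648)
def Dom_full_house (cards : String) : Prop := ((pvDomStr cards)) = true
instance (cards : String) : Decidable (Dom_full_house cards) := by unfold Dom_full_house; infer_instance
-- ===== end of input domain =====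

-- B replaces A's count-dict plus destructive remove-from-[2,3] checklist with an elimination
-- loop: repeatedly filter out all copies of the first remaining kind, read off its multiplicity
-- as the length drop, and set have2/have3 flags; an alternative of similar size, not faster.

-- shared parsing step, identical in both Pythons: kind = card[:2] if len(card) == 3 else card[0]
def kindOf (t : List Char) : List Char :=
  if t.length == 3 then PySem.List.slice t none (some 2)
  else
    match PySem.List.pyGet? t 0 with  -- card[0]; 'none' is unreachable: split() yields no empty tokens
    | some c => [c]
    | none => []

-- A's dict-counting loop body: card_obj[card] += 1 if present else card_obj[card] = 1
def countStep (d : PySem.Dict (List Char) Int) (card : List Char) : PySem.Dict (List Char) Int :=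
  if d.contains card then d.insert card (d.getD card 0 + 1) else d.insert card 1

-- A's checklist loop body: if card in house: house.remove(card)
def houseStep (h : List Int) (v : Int) : List Int :=
  if h.contains v then ((PySem.List.remove? h v).getD h) else h

-- ===== PORT A =====
def full_house (cards : String) : Bool :=
  let card_arr := (PySem.Chars.split₀ cards.toList).foldl (fun acc card => acc ++ [kindOf card]) []
  let card_obj := card_arr.foldl countStep PySem.Dict.empty
  let house := card_obj.values.foldl houseStep ([2, 3] : List Int)
  if house.length == 0 then true else false

-- ===== PORT B =====
-- B's while-loop: kinds shrinks by filtering out every copy of its first element each round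
def fhLoop (ks : List (List Char)) (have2 have3 : Bool) : Bool :=
  match ks with
  | [] => have2 && have3
  | k :: tl =>
    let rest := (k :: tl).filter (fun x => x ≠ k)
    let n := (k :: tl).length - rest.length
    fhLoop rest (have2 || (n == 2)) (have3 || (n == 3))
termination_by ks.length
decreasing_by
  simp only [List.filter_cons, decide_not, ne_eq, not_true_eq_false, decide_false,
    Bool.not_false, Bool.not_true, if_false, List.length_cons]
  exact Nat.lt_succ_of_le (List.length_filter_le _ _)

def full_house_alt (cards : String) : Bool :=
  let kinds := (PySem.Chars.split₀ cards.toList).map kindOf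
  fhLoop kinds false false

-- ===== PRECONDITION & SPEC =====
def Spec_full_house (cards : String) (out : Bool) : Prop := out = full_house_alt cards
instance (cards : String) (out : Bool) : Decidable (Spec_full_house cards out) := by unfold Spec_full_house; infer_instance

-- ===== CLAIM (what is proved, stated in full; the proofs are below) =====
def Claim_equal_full_house : Prop := ∀ (cards : String), Dom_full_house cards → Spec_full_house cards (full_house cards)

-- ===== LEMMAS AND PROOFS =====

-- A's counting loop is Counter(card_arr)
lemma count_fold_eq_counter (ks : List (List Char)) :
    ks.foldl countStep PySem.Dict.empty = PySem.Dict.counter ks := by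
  have h : ks.foldl countStep PySem.Dict.empty
      = ks.foldl (fun d card => d.insert card (d.getD card 0 + 1)) PySem.Dict.empty := by
    refine PySem.List.foldl_congr_mem _ _ _ _ ?_
    intro d card _
    by_cases hc : d.contains card = true
    · simp [countStep, hc]
    · simp [countStep, hc, PySem.Dict.getD_of_not_contains d 0 (show d.contains card = false by simpa using hc)]
  exact h.trans (PySem.Dict.foldl_insert_getD_add_one_eq_counter ks)

lemma house_nil (vs : List Int) : vs.foldl houseStep [] = [] := by
  induction vs with
  | nil => rfl
  | cons v vs ih => simpa [houseStep] using ih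

lemma house_single (vs : List Int) (a : Int) :
    vs.foldl houseStep [a] = [] ↔ a ∈ vs := by
  induction vs with
  | nil => simp
  | cons v vs ih =>
    by_cases hv : v = a
    · subst hv
      simp [List.foldl_cons, houseStep, PySem.List.remove?, house_nil]
    · simp [List.foldl_cons, houseStep, hv, Ne.symm hv, ih]

lemma house_pair (vs : List Int) :
    vs.foldl houseStep [2, 3] = [] ↔ (2 : Int) ∈ vs ∧ (3 : Int) ∈ vs := by
  induction vs with
  | nil => simp
  | cons v vs ih =>
    rw [List.foldl_cons]
    by_cases h2 : v = 2
    · subst h2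
      rw [show houseStep [2, 3] 2 = [3] from by decide, house_single]
      simp
    · by_cases h3 : v = 3
      · subst h3
        rw [show houseStep [2, 3] 3 = [2] from by decide, house_single]
        simp
      · rw [show houseStep [2, 3] v = [2, 3] from by simp [houseStep, h2, h3], ih]
        simp [List.mem_cons, Ne.symm h2, Ne.symm h3]

-- the membership test A's side ends up deciding
lemma mem_counter_values (ks : List (List Char)) (c : Int) :
    c ∈ (PySem.Dict.counter ks).values ↔ ∃ k ∈ ks, (ks.count k : Int) = c := by
  show c ∈ (PySem.Dict.counter ks).items.map (·.2) ↔ _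
  rw [PySem.Dict.items_counter]
  simp only [List.map_map, List.mem_map, Function.comp]
  constructor
  · rintro ⟨k, hk, rfl⟩
    exact ⟨k, (PySem.Set.mem_ofList ks k).mp hk, rfl⟩
  · rintro ⟨k, hk, rfl⟩
    exact ⟨k, (PySem.Set.mem_ofList ks k).mpr hk, rfl⟩

-- multiplicity of the head read off as the length drop under filtering
lemma count_add_filter (ks : List (List Char)) (k : List Char) :
    ks.count k + (ks.filter (fun x => x ≠ k)).length = ks.length := by
  induction ks with
  | nil => rfl
  | cons a tl ih =>
    by_cases h : a = k
    · subst h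
      have hf : ((a :: tl).filter (fun x => x ≠ a)) = tl.filter (fun x => x ≠ a) := by simp
      rw [hf, List.count_cons_self, List.length_cons]
      omega
    · have h' : k ≠ a := Ne.symm h
      have hf : ((a :: tl).filter (fun x => x ≠ k)) = a :: tl.filter (fun x => x ≠ k) := by
        simp [h]
      have hc : (a :: tl).count k = tl.count k := by
        simp [List.count_cons, h', h]
      rw [hf, hc, List.length_cons, List.length_cons]
      omega

-- splitting the existential over the eliminated kind and the rest
lemma exists_count_split (k : List Char) (tl : List (List Char)) (c : Nat) :
    (∃ x ∈ k :: tl, (k :: tl).count x = c)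
      ↔ ((k :: tl).count k = c
          ∨ ∃ x ∈ (k :: tl).filter (fun x => x ≠ k),
              ((k :: tl).filter (fun x => x ≠ k)).count x = c) := by
  have hcnt : ∀ x, x ≠ k →
      ((k :: tl).filter (fun x => x ≠ k)).count x = (k :: tl).count x := by
    intro x hx
    rw [List.count_filter]
    simp [hx]
  constructor
  · rintro ⟨x, hx, rfl⟩
    by_cases hxk : x = k
    · subst hxk; exact Or.inl rfl
    · refine Or.inr ⟨x, ?_, (hcnt x hxk)⟩
      rcases List.mem_cons.mp hx with h | h
      · exact absurd h hxk
      · simp [List.mem_filter, h, hxk]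
  · rintro (h | ⟨x, hx, rfl⟩)
    · exact ⟨k, by simp, h⟩
    · rcases List.mem_filter.mp hx with ⟨hmem, hne⟩
      exact ⟨x, hmem, (hcnt x (by simpa using hne)).symm⟩

-- one unfolding of B's loop, lets zeta-reduced
lemma fhLoop_cons (k : List Char) (tl : List (List Char)) (a b : Bool) :
    fhLoop (k :: tl) a b
      = fhLoop ((k :: tl).filter (fun x => x ≠ k))
          (a || (((k :: tl).length - ((k :: tl).filter (fun x => x ≠ k)).length) == 2))
          (b || (((k :: tl).length - ((k :: tl).filter (fun x => x ≠ k)).length) == 3)) := by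
  rw [fhLoop]

-- what B's elimination loop computes
set_option maxHeartbeats 1000000 in
lemma fhLoop_eq (ks : List (List Char)) (a b : Bool) :
    fhLoop ks a b = ((a || decide (∃ x ∈ ks, ks.count x = 2))
                      && (b || decide (∃ x ∈ ks, ks.count x = 3))) := by
  induction hn : ks.length using Nat.strong_induction_on generalizing ks a b with
  | _ n ih =>
    match ks with
    | [] => simp [fhLoop]
    | k :: tl =>
      have hlt : ((k :: tl).filter (fun x => x ≠ k)).length < n := by
        subst hn
        simp only [List.filter_cons, decide_not, ne_eq, List.length_cons]
        simp only [decide_true, Bool.not_true, if_false]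
        exact Nat.lt_succ_of_le (List.length_filter_le _ _)
      rw [fhLoop_cons, ih _ hlt _ _ _ rfl]
      have hm : (k :: tl).length - ((k :: tl).filter (fun x => x ≠ k)).length
          = (k :: tl).count k := by
        have := count_add_filter (k :: tl) k
        omega
      rw [hm]
      have e2 := exists_count_split k tl 2
      have e3 := exists_count_split k tl 3
      rw [Bool.eq_iff_iff]
      simp only [Bool.and_eq_true, Bool.or_eq_true, beq_iff_eq, decide_eq_true_eq]
      rw [e2, e3]
      tauto

lemma int_count_cast (ks : List (List Char)) (c : Nat) :
    (∃ k ∈ ks, (ks.count k : Int) = (c : Int)) ↔ ∃ k ∈ ks, ks.count k = c := by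
  constructor <;> rintro ⟨k, hk, h⟩ <;> exact ⟨k, hk, by exact_mod_cast h⟩

-- ===== VERDICT (by name: the statement is the Claim_ definition above) =====
theorem full_house_spec : Claim_equal_full_house := by
  intro cards _
  show full_house cards = full_house_alt cards
  unfold full_house full_house_alt
  simp only [PySem.List.foldl_append_singleton_eq_map, List.nil_append, count_fold_eq_counter]
  set ks := (PySem.Chars.split₀ cards.toList).map kindOf with hks
  rw [fhLoop_eq]
  simp only [Bool.false_or]
  by_cases hE : (PySem.Dict.counter ks).values.foldl houseStep [2, 3] = []
  · have h23 := (house_pair _).mp hE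
    have h2 := (int_count_cast ks 2).mp (by exact_mod_cast (mem_counter_values ks 2).mp h23.1)
    have h3 := (int_count_cast ks 3).mp (by exact_mod_cast (mem_counter_values ks 3).mp h23.2)
    simp [hE, h2, h3]
  · have hne : ¬ ((2 : Int) ∈ (PySem.Dict.counter ks).values ∧ (3 : Int) ∈ (PySem.Dict.counter ks).values) :=
      fun h => hE ((house_pair _).mpr h)
    have hlen : ((PySem.Dict.counter ks).values.foldl houseStep [2, 3]).length ≠ 0 := by
      simpa [List.length_eq_zero_iff] using hE
    rcases not_and_or.mp hne with h | h
    · have h2 : ¬ ∃ k ∈ ks, ks.count k = 2 := fun hx =>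
        h ((mem_counter_values ks 2).mpr (by exact_mod_cast (int_count_cast ks 2).mpr hx))
      simp [hlen, h2]
    · have h3 : ¬ ∃ k ∈ ks, ks.count k = 3 := fun hx =>
        h ((mem_counter_values ks 3).mpr (by exact_mod_cast (int_count_cast ks 3).mpr hx))
      simp [hlen, h3]
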